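-- pv_equiv track=rewrite | github.com/iuvsingh/CS112-Projects | P5/usingh2_233_P5.py | grades_to_str
-- ===== SOURCE A (Python) =====
-- def grades_to_str(grades):
--     result=''
--     key_lst,val_lst=[],[]
--
--     for keys_str in grades.keys():
--         key_lst.append(keys_str)
--     for vals_str in grades.values():
--         val_lst.append(vals_str)
--
--     for i in range(len(grades)):
--         result+=key_lst[i]+': '+str(val_lst[i])+'\n'
--     return result
-- ===== SOURCE B (Python) =====
-- def grades_to_str(grades):
--     # one pass over the dict's items; no intermediate parallel lists, no index loop
--     return ''.join(k + ': ' + str(v) + '\n' for k, v in grades.items())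
-- ===== Notes on version B (the rewrite author's own statement) =====
-- stated objective: simpler
-- what changed: Replaced the three loops (build key list, build value list, index both by range(len)) with a single pass over grades.items() joined by ''.join.
import Mathlib
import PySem

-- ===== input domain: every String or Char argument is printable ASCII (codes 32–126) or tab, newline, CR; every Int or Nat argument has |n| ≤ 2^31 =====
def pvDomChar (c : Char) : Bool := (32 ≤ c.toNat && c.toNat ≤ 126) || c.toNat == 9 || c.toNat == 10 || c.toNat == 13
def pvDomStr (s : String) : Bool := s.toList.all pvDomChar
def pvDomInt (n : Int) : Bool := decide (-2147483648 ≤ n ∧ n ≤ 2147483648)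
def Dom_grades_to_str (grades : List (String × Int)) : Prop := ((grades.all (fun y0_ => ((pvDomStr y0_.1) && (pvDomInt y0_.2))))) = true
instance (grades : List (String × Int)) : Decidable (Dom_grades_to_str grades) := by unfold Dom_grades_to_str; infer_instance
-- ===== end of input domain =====

-- B replaces A's three loops (collect keys, collect values, index both by range) with one pass over the items joined by ''.join; same output, simpler.


-- ===== PORT A =====
-- string concatenation is carried as List Char (String.append is opaque to the kernel);
-- key_lst[i] / val_lst[i] use pyGetD: i ∈ range(len(grades)) is always in range, so the default is never read
def grades_to_str (grades : List (String × Int)) : String :=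
  let key_lst : List String := grades.foldl (fun acc kv => acc ++ [kv.1]) []
  let val_lst : List Int := grades.foldl (fun acc kv => acc ++ [kv.2]) []
  let result : List Char :=
    (PySem.List.pyRange 0 (grades.length : Int) 1).foldl
      (fun result i =>
        result ++ (PySem.List.pyGetD key_lst i "").toList
          ++ (": ").toList
          ++ (PySem.Int.toStr (PySem.List.pyGetD val_lst i 0)).toList
          ++ ['\n'])
      []
  String.ofList result

-- ===== PORT B =====
def grades_to_str_alt (grades : List (String × Int)) : String :=
  PySem.Str.join "" (grades.map (fun kv =>
    String.ofList (kv.1.toList ++ (": ").toList ++ (PySem.Int.toStr kv.2).toList ++ ['\n'])))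

-- ===== PRECONDITION & SPEC =====
def Spec_grades_to_str (grades : List (String × Int)) (out : String) : Prop := out = grades_to_str_alt grades
instance (grades : List (String × Int)) (out : String) : Decidable (Spec_grades_to_str grades out) := by unfold Spec_grades_to_str; infer_instance

-- ===== CLAIM (what is proved, stated in full; the proofs are below) =====
def Claim_equal_grades_to_str : Prop := ∀ (grades : List (String × Int)), Dom_grades_to_str grades → Spec_grades_to_str grades (grades_to_str grades)

-- ===== LEMMAS AND PROOFS =====

-- the per-item piece both programs emit
def pvPiece (kv : String × Int) : List Char :=
  kv.1.toList ++ (": ").toList ++ (PySem.Int.toStr kv.2).toList ++ ['\n']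

theorem pvJoin_empty (parts : List (List Char)) :
    PySem.Chars.join [] parts = parts.flatten := by
  match parts with
  | [] => simp [PySem.Chars.join_nil]
  | [p] => simp [PySem.Chars.join_singleton]
  | p :: q :: rest =>
      rw [PySem.Chars.join_cons_cons]
      simp [pvJoin_empty (q :: rest)]

theorem pvGetD_fst (grades : List (String × Int)) (i : Int) :
    PySem.List.pyGetD (grades.map (·.1)) i "" = (PySem.List.pyGetD grades i ("", 0)).1 := by
  simpa using PySem.List.pyGetD_map (·.1) grades i ("", 0)

theorem pvGetD_snd (grades : List (String × Int)) (i : Int) :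
    PySem.List.pyGetD (grades.map (·.2)) i 0 = (PySem.List.pyGetD grades i ("", 0)).2 := by
  simpa using PySem.List.pyGetD_map (·.2) grades i ("", 0)

theorem pvA_eq (grades : List (String × Int)) :
    grades_to_str grades = String.ofList (grades.flatMap pvPiece) := by
  unfold grades_to_str
  rw [PySem.List.foldl_append_singleton_eq_map (f := (·.1)) grades [],
      PySem.List.foldl_append_singleton_eq_map (f := (·.2)) grades []]
  simp only [List.nil_append]
  have hbody :
      (PySem.List.pyRange 0 (grades.length : Int) 1).foldl
        (fun result i =>
          result ++ (PySem.List.pyGetD (grades.map (·.1)) i "").toList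
            ++ (": ").toList
            ++ (PySem.Int.toStr (PySem.List.pyGetD (grades.map (·.2)) i 0)).toList
            ++ ['\n'])
        [] =
      (PySem.List.pyRange 0 (grades.length : Int) 1).foldl
        (fun result i => result ++ pvPiece (PySem.List.pyGetD grades i ("", 0)))
        [] := by
    apply PySem.List.foldl_congr_mem
    intro acc x _
    simp [pvGetD_fst, pvGetD_snd, pvPiece]
  rw [hbody]
  rw [show PySem.List.pyRange 0 (grades.length : Int) 1
        = PySem.List.pyRange 0 (grades.length : Int) from rfl]
  rw [PySem.List.foldl_pyRange_zero_pyGetD' grades ("", 0)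
        (fun acc kv => acc ++ pvPiece kv) []]
  rw [PySem.List.foldl_append_eq_flatMap pvPiece grades []]
  rfl

theorem pvB_eq (grades : List (String × Int)) :
    grades_to_str_alt grades = String.ofList (grades.flatMap pvPiece) := by
  have h : (grades_to_str_alt grades).toList = grades.flatMap pvPiece := by
    unfold grades_to_str_alt
    rw [PySem.Str.toList_join, show ("" : String).toList = [] from rfl, pvJoin_empty, List.map_map, List.flatMap_def]
    congr 1
    apply List.map_congr_left
    intro kv _
    simp [Function.comp, pvPiece]
  calc grades_to_str_alt grades
      = String.ofList (grades_to_str_alt grades).toList := by simp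
    _ = String.ofList (grades.flatMap pvPiece) := by rw [h]

-- ===== VERDICT (by name: the statement is the Claim_ definition above) =====
theorem grades_to_str_spec : Claim_equal_grades_to_str := by
  intro grades _
  unfold Spec_grades_to_str
  rw [pvA_eq, pvB_eq]
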